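-- pv_equiv track=rewrite | github.com/xiaohuailabs/sxx-wechat-format | scripts/generate.py | _parse_frontmatter_and_body
-- ===== SOURCE A (Python) =====
-- def _parse_frontmatter_and_body(text: str) -> tuple[dict, str]:
--     """
--     只解析最简单的一层 frontmatter（--- ... ---），够用即可：
--       aspect_ratio: "16:9"
--       image_size: "4K"
--     """
--     lines = text.splitlines()
--     if not lines or lines[0].strip() != "---":
--         return {}, text
--
--     end = None
--     for i in range(1, len(lines)):
--         if lines[i].strip() == "---":
--             end = i
--             break
--     if end is None:
--         return {}, text
--
--     meta: dict[str, str] = {}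
--     for line in lines[1:end]:
--         s = line.strip()
--         if not s or s.startswith("#") or ":" not in s:
--             continue
--         k, v = s.split(":", 1)
--         k = k.strip()
--         v = v.strip()
--         if not k:
--             continue
--         if (len(v) >= 2) and ((v[0] == v[-1] == '"') or (v[0] == v[-1] == "'")):
--             v = v[1:-1]
--         meta[k] = v
--
--     body = "\n".join(lines[end + 1 :]).lstrip("\n")
--     return meta, body
-- ===== SOURCE B (Python) =====
-- def _parse_frontmatter_and_body(text: str) -> tuple[dict, str]:
--     """Single-pass variant: scan the lines once, parsing meta entries as we go
--     and returning the moment the closing '---' is seen."""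
--     lines = text.splitlines()
--     if not lines or lines[0].strip() != "---":
--         return {}, text
--
--     meta: dict[str, str] = {}
--     rest = lines[1:]
--     while rest:
--         line, rest = rest[0], rest[1:]
--         if line.strip() == "---":
--             return meta, "\n".join(rest).lstrip("\n")
--         s = line.strip()
--         if not s or s.startswith("#") or ":" not in s:
--             continue
--         k, _, v = s.partition(":")
--         k = k.strip()
--         v = v.strip()
--         if len(v) >= 2 and v[0] == v[-1] and v[0] in "\"'":
--             v = v[1:-1]
--         if k:
--             meta[k] = v
--     return {}, text
-- ===== Notes on version B (the rewrite author's own statement) =====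
-- stated objective: alternative
-- what changed: Replaces A's two-phase structure (first scan for the closing delimiter line, then a second pass parsing the frontmatter slice) by a single streaming pass that parses meta entries as it goes and returns the moment the closing delimiter is seen, using str.partition instead of two-argument str.split and a merged quote test.
import Mathlib
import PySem

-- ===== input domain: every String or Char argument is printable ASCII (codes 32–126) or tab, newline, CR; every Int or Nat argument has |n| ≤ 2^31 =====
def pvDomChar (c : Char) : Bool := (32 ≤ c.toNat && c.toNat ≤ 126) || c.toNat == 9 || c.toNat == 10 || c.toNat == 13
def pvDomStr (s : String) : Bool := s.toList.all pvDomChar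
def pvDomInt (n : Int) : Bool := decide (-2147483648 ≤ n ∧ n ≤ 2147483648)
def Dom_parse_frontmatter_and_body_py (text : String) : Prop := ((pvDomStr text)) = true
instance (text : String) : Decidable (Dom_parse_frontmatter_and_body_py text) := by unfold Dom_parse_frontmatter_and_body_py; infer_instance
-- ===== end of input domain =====

-- B replaces A's two-phase structure (find the closing '---', then parse the slice) by a single
-- streaming pass that parses entries as it goes and returns at the closing delimiter (alternative
-- decomposition, same cost).

-- s.lstrip("\n"): hand port (PySem has no lstrip-with-chars); exact for this one-char strip set.
def pvLstripNl (s : String) : String := String.ofList (s.toList.dropWhile (· == '\n'))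

-- ===== PORT A =====
-- the quote-unwrapping step: if len(v)>=2 and (v[0]==v[-1]=='"' or v[0]==v[-1]=="'"): v = v[1:-1]
def pvUnquoteA (v : String) : String :=
  if 2 ≤ PySem.Str.len v ∧
      ((PySem.Str.pyGet? v 0 = some '"' ∧ PySem.Str.pyGet? v (-1) = some '"') ∨
       (PySem.Str.pyGet? v 0 = some '\'' ∧ PySem.Str.pyGet? v (-1) = some '\'')) then
    PySem.Str.slice v (some 1) (some (-1))
  else v

-- one iteration of A's meta loop body
def pvProcA (d : PySem.Dict String String) (line : String) : PySem.Dict String String :=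
  let s := PySem.Str.strip line
  if s = "" ∨ PySem.Str.startswith s "#" = true ∨ PySem.Str.isIn ":" s = false then d
  else
    match PySem.Str.splitMax? s ":" 1 with
    | some (k0 :: v0 :: _) =>
        let k := PySem.Str.strip k0
        let v := PySem.Str.strip v0
        if k = "" then d else d.insert k (pvUnquoteA v)
    | _ => d  -- unreachable: ':' ∈ s guarantees a 2-element split

-- the search loop: for i in range(1, len(lines)): if lines[i].strip() == "---": end = i; break
def pvFindEndA : List String → Nat → Option Nat
  | [], _ => none
  | l :: ls, i => if PySem.Str.strip l = "---" then some i else pvFindEndA ls (i + 1)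

def parse_frontmatter_and_body_py (text : String) : (List (String × String)) × String :=
  match PySem.Str.splitlines text with
  | [] => ([], text)
  | l0 :: _ =>
    let lines := PySem.Str.splitlines text
    if PySem.Str.strip l0 ≠ "---" then ([], text)
    else
      match pvFindEndA (lines.drop 1) 1 with
      | none => ([], text)
      | some e =>
        let m := (PySem.List.slice lines (some 1) (some (e : Int))).foldl pvProcA PySem.Dict.empty
        let body := pvLstripNl (PySem.Str.join "\n" (PySem.List.slice lines (some ((e : Int) + 1)) none))
        (m.items, body)

-- ===== PORT B =====
-- one iteration of B's loop body: partition(":") and the merged quote test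
def pvProcB (d : PySem.Dict String String) (line : String) : PySem.Dict String String :=
  let s := PySem.Str.strip line
  if s = "" then d
  else if PySem.Str.startswith s "#" = true then d
  else if PySem.Str.isIn ":" s = false then d
  else
    let cs := s.toList
    let k := PySem.Str.strip (String.ofList (cs.takeWhile (· != ':')))
    let v := PySem.Str.strip (String.ofList ((cs.dropWhile (· != ':')).drop 1))
    let vs := v.toList
    let v' := if 2 ≤ vs.length ∧ vs.head? = vs.getLast? ∧ (vs.head? = some '"' ∨ vs.head? = some '\'') then
        String.ofList ((vs.drop 1).dropLast)
      else v
    if k = "" then d else d.insert k v'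

def pvLoopB (text : String) : List String → PySem.Dict String String → (List (String × String)) × String
  | [], _ => ([], text)
  | l :: rest, d =>
    if PySem.Str.strip l = "---" then (d.items, pvLstripNl (PySem.Str.join "\n" rest))
    else pvLoopB text rest (pvProcB d l)

def parse_frontmatter_and_body_py_alt (text : String) : (List (String × String)) × String :=
  match PySem.Str.splitlines text with
  | [] => ([], text)
  | l0 :: rest =>
    if PySem.Str.strip l0 = "---" then pvLoopB text rest PySem.Dict.empty else ([], text)

-- ===== PRECONDITION & SPEC =====
def Spec_parse_frontmatter_and_body_py (text : String) (out : (List (String × String)) × String) : Prop := out = parse_frontmatter_and_body_py_alt text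
instance (text : String) (out : (List (String × String)) × String) : Decidable (Spec_parse_frontmatter_and_body_py text out) := by unfold Spec_parse_frontmatter_and_body_py; infer_instance

-- ===== CLAIM (what is proved, stated in full; the proofs are below) =====
def Claim_equal_parse_frontmatter_and_body_py : Prop := ∀ (text : String), Dom_parse_frontmatter_and_body_py text → Spec_parse_frontmatter_and_body_py text (parse_frontmatter_and_body_py text)

-- ===== LEMMAS AND PROOFS =====

theorem pvFindEndA_eq (ls : List String) (i : Nat) :
    pvFindEndA ls i = (ls.findIdx? (fun l => PySem.Str.strip l == "---")).map (· + i) := by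
  induction ls generalizing i with
  | nil => simp [pvFindEndA]
  | cons l ls ih =>
    simp only [pvFindEndA, List.findIdx?_cons]
    by_cases h : PySem.Str.strip l = "---"
    · simp [h]
    · simp only [h, beq_iff_eq, if_false]
      rw [ih]
      cases ls.findIdx? (fun l => PySem.Str.strip l == "---") <;> simp <;> omega


theorem pvGo_zero (fuel : Nat) (l : List Char) (acc : List (List Char)) :
    PySem.Chars.splitOnMax.go [':'] fuel 0 l [] acc = acc.reverse ++ [l] := by
  cases fuel <;> cases l <;> simp [PySem.Chars.splitOnMax.go]

theorem pvGo_one (l : List Char) (fuel : Nat) (cur : List Char) (acc : List (List Char))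
    (hm : ':' ∈ l) (hf : l.length ≤ fuel) :
    PySem.Chars.splitOnMax.go [':'] fuel 1 l cur acc =
      acc.reverse ++ [cur.reverse ++ l.takeWhile (· != ':'), (l.dropWhile (· != ':')).drop 1] := by
  induction l generalizing fuel cur acc with
  | nil => simp at hm
  | cons c rest ih =>
    cases fuel with
    | zero => simp at hf
    | succ f =>
      by_cases hc : c = ':'
      · subst hc
        have hpre : [':'].isPrefixOf (':' :: rest) = true := by simp [List.isPrefixOf]
        simp only [PySem.Chars.splitOnMax.go, hpre, if_true]
        rw [pvGo_zero]
        simp [List.takeWhile, List.dropWhile]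
      · have hpre : [':'].isPrefixOf (c :: rest) = true → False := by
          simp [List.isPrefixOf]; intro h; exact hc h.symm
        have hm' : ':' ∈ rest := by cases hm with
          | head => exact absurd rfl hc
          | tail _ h => exact h
        simp only [PySem.Chars.splitOnMax.go]
        rw [if_neg (by simp), if_neg (by simpa using hpre)]
        rw [ih _ _ _ hm' (by simpa using Nat.le_of_succ_le_succ hf)]
        have hcne : (c != ':') = true := by simpa using hc
        simp [List.takeWhile, List.dropWhile, hcne]

theorem pvSplitOnMax_colon (cs : List Char) (hm : ':' ∈ cs) :
    PySem.Chars.splitOnMax cs [':'] 1 =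
      [cs.takeWhile (· != ':'), (cs.dropWhile (· != ':')).drop 1] := by
  unfold PySem.Chars.splitOnMax
  rw [if_neg (by omega)]
  show PySem.Chars.splitOnMax.go [':'] (cs.length + 1) 1 cs [] [] = _
  rw [pvGo_one cs (cs.length + 1) [] [] hm (by omega)]
  simp

theorem pvIsIn_colon (s : String) : PySem.Str.isIn ":" s = true ↔ ':' ∈ s.toList := by
  rw [show PySem.Str.isIn ":" s = PySem.Chars.isIn ":".toList s.toList from by
        simp [PySem.Str.isIn]]
  rw [PySem.Chars.isIn_iff_infix]
  constructor
  · intro h; exact h.mem (by decide)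
  · intro h
    obtain ⟨l1, l2, hh⟩ := List.append_of_mem h
    exact ⟨l1, l2, by rw [hh]; simp⟩

theorem pvSplitMax_colon (s : String) (hm : ':' ∈ s.toList) :
    PySem.Str.splitMax? s ":" 1 =
      some [String.ofList (s.toList.takeWhile (· != ':')),
            String.ofList ((s.toList.dropWhile (· != ':')).drop 1)] := by
  have h := PySem.Str.splitMax?_map s ":" 1
  rw [show (":" : String).toList = [':'] from rfl, PySem.Chars.splitMax?] at h
  rw [if_neg (by decide), pvSplitOnMax_colon s.toList hm] at h
  cases ho : PySem.Str.splitMax? s ":" 1 with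
  | none => rw [ho] at h; simp at h
  | some ks =>
    rw [ho] at h
    simp only [Option.map_some, Option.some.injEq] at h
    cases ks with
    | nil => simp at h
    | cons a t =>
      cases t with
      | nil => simp at h
      | cons b t2 =>
        cases t2 with
        | cons c t3 => simp at h
        | nil =>
          simp only [List.map_cons, List.map_nil, List.cons.injEq, and_true] at h
          obtain ⟨h1, h2⟩ := h
          rw [← h1, ← h2, String.ofList_toList, String.ofList_toList]

theorem pvSlice_one_negone (xs : List Char) (h : 2 ≤ xs.length) :
    PySem.List.slice xs (some 1) (some (-1)) = (xs.drop 1).dropLast := by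
  have h1 : PySem.List.clampIdx xs.length 1 = 1 := by
    simp only [PySem.List.clampIdx]; rw [if_neg (by omega)]; simp; omega
  have h2 : PySem.List.clampIdx xs.length (-1) = xs.length - 1 := by
    simp only [PySem.List.clampIdx]; rw [if_pos (by omega), if_neg (by omega)]; omega
  simp only [PySem.List.slice, h1, h2, List.dropLast_eq_take, List.length_drop]

theorem pvUnquote_eq (v : String) :
    pvUnquoteA v =
      (if 2 ≤ v.toList.length ∧ v.toList.head? = v.toList.getLast? ∧
          (v.toList.head? = some '"' ∨ v.toList.head? = some '\'') then
        String.ofList ((v.toList.drop 1).dropLast)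
      else v) := by
  unfold pvUnquoteA
  have hg0 : PySem.Str.pyGet? v 0 = v.toList.head? := by
    rw [show (0:Int) = ((0:Nat):Int) from rfl, PySem.Str.pyGet?_eq,
      PySem.Chars.pyGet?_eq_listPyGet?, PySem.List.pyGet?_natCast]
    cases v.toList <;> simp
  have hg1 : PySem.Str.pyGet? v (-1) = v.toList.getLast? := by
    rw [PySem.Str.pyGet?_eq, PySem.Chars.pyGet?_eq_listPyGet?, PySem.List.pyGet?_neg_one]
  rw [hg0, hg1, PySem.Str.len_eq]
  by_cases hb : 2 ≤ v.toList.length ∧ v.toList.head? = v.toList.getLast? ∧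
      (v.toList.head? = some '"' ∨ v.toList.head? = some '\'')
  · obtain ⟨hl, he, hq⟩ := hb
    rw [if_pos ⟨by exact_mod_cast hl, by
        cases hq with
        | inl h => exact Or.inl ⟨h, by rw [← he, h]⟩
        | inr h => exact Or.inr ⟨h, by rw [← he, h]⟩⟩,
      if_pos ⟨hl, he, hq⟩]
    rw [← String.ofList_toList (s := PySem.Str.slice v (some 1) (some (-1))),
      PySem.Str.toList_slice, PySem.Chars.slice_eq_listSlice, pvSlice_one_negone _ hl]
  · rw [if_neg ?_, if_neg hb]
    intro ⟨hl, hq⟩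
    apply hb
    refine ⟨by exact_mod_cast hl, ?_, ?_⟩
    · cases hq with
      | inl h => rw [h.1, h.2]
      | inr h => rw [h.1, h.2]
    · cases hq with
      | inl h => exact Or.inl h.1
      | inr h => exact Or.inr h.1

theorem pvProc_eq (d : PySem.Dict String String) (line : String) :
    pvProcA d line = pvProcB d line := by
  unfold pvProcA pvProcB
  by_cases hs : PySem.Str.strip line = ""
  · rw [if_pos (Or.inl hs), if_pos hs]
  by_cases hst : PySem.Str.startswith (PySem.Str.strip line) "#" = true
  · rw [if_pos (Or.inr (Or.inl hst)), if_neg hs, if_pos hst]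
  by_cases hin : PySem.Str.isIn ":" (PySem.Str.strip line) = false
  · rw [if_pos (Or.inr (Or.inr hin)), if_neg hs, if_neg hst, if_pos hin]
  · have hin' : PySem.Str.isIn ":" (PySem.Str.strip line) = true := by
      revert hin; cases PySem.Str.isIn ":" (PySem.Str.strip line) <;> simp
    have hm : ':' ∈ (PySem.Str.strip line).toList := (pvIsIn_colon _).mp hin'
    rw [if_neg (fun h => h.elim hs (fun h' => h'.elim hst hin))]
    rw [if_neg hs, if_neg hst, if_neg hin]
    rw [pvSplitMax_colon _ hm]
    simp only [pvUnquote_eq]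

theorem pvLoopB_eq (text : String) (ls : List String) (d : PySem.Dict String String) :
    pvLoopB text ls d =
      match ls.findIdx? (fun l => PySem.Str.strip l == "---") with
      | none => ([], text)
      | some j => (((ls.take j).foldl pvProcB d).items,
                   pvLstripNl (PySem.Str.join "\n" (ls.drop (j + 1)))) := by
  induction ls generalizing d with
  | nil => simp [pvLoopB]
  | cons l ls ih =>
    simp only [pvLoopB, List.findIdx?_cons]
    by_cases h : PySem.Str.strip l = "---"
    · simp [h]
    · rw [if_neg h, if_neg (by simpa using h), ih]
      cases ls.findIdx? (fun l => PySem.Str.strip l == "---") <;> simp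

theorem pvProcFun_eq : pvProcA = pvProcB := funext fun d => funext fun l => pvProc_eq d l

theorem parse_frontmatter_and_body_py_spec : Claim_equal_parse_frontmatter_and_body_py := by
  intro text _
  unfold Spec_parse_frontmatter_and_body_py
  unfold parse_frontmatter_and_body_py parse_frontmatter_and_body_py_alt
  cases hls : PySem.Str.splitlines text with
  | nil => rfl
  | cons l0 rest =>
    simp only [hls]
    by_cases hl0 : PySem.Str.strip l0 = "---"
    · rw [if_neg (by simp [hl0]), if_pos hl0, pvLoopB_eq]
      simp only [List.drop_succ_cons, List.drop_zero, pvFindEndA_eq]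
      cases hfi : rest.findIdx? (fun l => PySem.Str.strip l == "---") with
      | none => rfl
      | some j =>
        simp only [Option.map_some]
        have hc1 : ((j + 1 : Nat) : Int) = ((j:Nat) : Int) + ((1:Nat) : Int) := by push_cast; ring
        have hsl1 : PySem.List.slice (l0 :: rest) (some ((j + 1 : Nat) : Int)) none
            = rest.drop j := by
          rw [PySem.List.slice_from_natCast]
          simp
        have hsl2 : PySem.List.slice (l0 :: rest) (some ((1:Nat) : Int)) (some ((j + 1 : Nat) : Int))
            = rest.take j := by
          rw [PySem.List.slice_natCast]
          simp
        have hsl3 : PySem.List.slice (l0 :: rest) (some (((j + 1 : Nat) : Int) + 1)) none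
            = rest.drop (j + 1) := by
          rw [show (((j + 1 : Nat) : Int) + 1) = ((j + 2 : Nat) : Int) by push_cast; ring,
            PySem.List.slice_from_natCast]
          simp
        rw [show ((1 : Nat) : Int) = (1 : Int) from rfl] at hsl2
        rw [hsl2, hsl3, pvProcFun_eq]
    · rw [if_pos (by simp [hl0]), if_neg hl0]
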